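-- pv_equiv track=rewrite | github.com/AstroAir/github-cli | github_cli/ui/diff_viewer.py | _split_diff_hunks
-- ===== SOURCE A (Python) =====
-- from typing import List, Dict, Any, Optional
--
-- def _split_diff_hunks(diff_content: str) -> Dict[str, str]:
--     """Split diff content into file hunks"""
--     result = {}
--     current_file = None
--     current_content = []
--
--     for line in diff_content.split('\n'):
--         if line.startswith('diff --git'):
--             # New file diff starts
--             if current_file:
--                 result[current_file] = '\n'.join(current_content)
--
--             # Get the new file name
--             parts = line.split(' b/')
--             if len(parts) > 1:
--                 current_file = parts[1]
--             else:
--                 current_file = f"File {len(result) + 1}"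
--
--             current_content = [line]
--         elif current_file:
--             current_content.append(line)
--
--     # Add the last file
--     if current_file:
--         result[current_file] = '\n'.join(current_content)
--
--     return result
-- ===== SOURCE B (Python) =====
-- def _is_header(line):
--     return line.startswith('diff --git')
--
--
-- def _split_diff_hunks(diff_content: str):
--     """Split diff content into file hunks (block-slicing decomposition)."""
--     lines = diff_content.split('\n')
--     n = len(lines)
--     i = 0
--     # drop any prologue before the first 'diff --git' header
--     while i < n and not _is_header(lines[i]):
--         i += 1
--     result = {}
--     while i < n:
--         j = i + 1
--         while j < n and not _is_header(lines[j]):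
--             j += 1
--         block = lines[i:j]
--         parts = block[0].split(' b/')
--         name = parts[1] if len(parts) > 1 else f"File {len(result) + 1}"
--         if name:
--             result[name] = '\n'.join(block)
--         i = j
--     return result
-- ===== Notes on version B (the rewrite author's own statement) =====
-- stated objective: alternative
-- what changed: Replaces A's single stateful line loop carrying (result, current_file, current_content) by a two-level block-slicing decomposition: advance to each 'diff --git' boundary, slice the whole block out at once, and commit it; no per-line accumulator or current-file state is carried.
import Mathlib
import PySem

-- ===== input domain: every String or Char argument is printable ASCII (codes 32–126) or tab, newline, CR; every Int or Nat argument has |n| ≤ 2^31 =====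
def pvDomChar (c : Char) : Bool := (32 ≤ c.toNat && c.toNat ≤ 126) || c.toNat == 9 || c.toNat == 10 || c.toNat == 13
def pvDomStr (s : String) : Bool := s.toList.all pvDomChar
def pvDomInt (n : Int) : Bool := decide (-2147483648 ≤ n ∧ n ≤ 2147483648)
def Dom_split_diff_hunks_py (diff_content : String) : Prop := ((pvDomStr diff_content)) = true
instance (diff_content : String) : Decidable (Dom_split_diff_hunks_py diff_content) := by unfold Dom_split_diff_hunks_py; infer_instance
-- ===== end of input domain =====

-- B replaces A's single stateful line loop (result / current_file / current_content) by a
-- block-slicing decomposition: find the 'diff --git' boundaries first, then commit one slice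
-- per block; objective: alternative (same cost, no carried loop state).

-- ===== PORT A =====

-- Python truthiness of `current_file` (None or a string:a non-empty string is truthy)
def pvTruthy (cf : Option String) : Bool :=
  match cf with
  | none => false
  | some f => !(f == "")

-- `if current_file: result[current_file] = '\n'.join(current_content)`
def pvCommit (result : PySem.Dict String String) (cf : Option String) (cc : List String) :
    PySem.Dict String String :=
  if pvTruthy cf then result.insert (cf.getD "") (PySem.Str.join "\n" cc) else result

-- `parts = line.split(' b/'); parts[1] if len(parts) > 1 else f"File {len(result) + 1}"`
-- (separator ' b/' is a non-empty literal, so split? is `some`; .getD [] is exact)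
def pvFileName (result : PySem.Dict String String) (line : String) : String :=
  let parts := (PySem.Str.split? line " b/").getD []
  if 1 < parts.length then parts.getD 1 ""
  else "File " ++ PySem.Int.toStr ((result.size : Int) + 1)

-- one iteration of A's `for line in diff_content.split('\n')`
def pvStepA (st : PySem.Dict String String × Option String × List String) (line : String) :
    PySem.Dict String String × Option String × List String :=
  let (result, cf, cc) := st
  if PySem.Str.startswith line "diff --git" then
    let result := pvCommit result cf cc
    (result, some (pvFileName result line), [line])
  else if pvTruthy cf then (result, cf, cc ++ [line])
  else (result, cf, cc)

def split_diff_hunks_py (diff_content : String) : List (String × String) :=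
  let st := ((PySem.Str.split? diff_content "\n").getD []).foldl pvStepA
      (PySem.Dict.empty, none, [])
  (pvCommit st.1 st.2.1 st.2.2).items

-- ===== PORT B =====

def pvIsHeader (line : String) : Bool := PySem.Str.startswith line "diff --git"

-- the inner `while` pair of Source B: slice off one block (header + following non-header lines),
-- commit it, continue at the next header
def pvBlocksLoop : List String → PySem.Dict String String → PySem.Dict String String
  | [], result => result
  | h :: t, result =>
    let block := h :: t.takeWhile (fun l => !pvIsHeader l)
    let parts := (PySem.Str.split? h " b/").getD []
    let name := if 1 < parts.length then parts.getD 1 ""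
                else "File " ++ PySem.Int.toStr ((result.size : Int) + 1)
    let result := if name == "" then result
                  else result.insert name (PySem.Str.join "\n" block)
    pvBlocksLoop (t.dropWhile (fun l => !pvIsHeader l)) result
  termination_by ls _ => ls.length
  decreasing_by
    have := List.length_dropWhile_le (fun l => !pvIsHeader l) t
    simp; omega

def split_diff_hunks_py_alt (diff_content : String) : List (String × String) :=
  let lines := (PySem.Str.split? diff_content "\n").getD []
  (pvBlocksLoop (lines.dropWhile (fun l => !pvIsHeader l)) PySem.Dict.empty).items

-- ===== PRECONDITION & SPEC =====
def Spec_split_diff_hunks_py (diff_content : String) (out : List (String × String)) : Prop := out = split_diff_hunks_py_alt diff_content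
instance (diff_content : String) (out : List (String × String)) : Decidable (Spec_split_diff_hunks_py diff_content out) := by unfold Spec_split_diff_hunks_py; infer_instance

-- ===== CLAIM (what is proved, stated in full; the proofs are below) =====
def Claim_equal_split_diff_hunks_py : Prop := ∀ (diff_content : String), Dom_split_diff_hunks_py diff_content → Spec_split_diff_hunks_py diff_content (split_diff_hunks_py diff_content)

-- ===== LEMMAS AND PROOFS =====

-- main invariant: running A's loop from a falsy state equals B's block loop on the remaining
-- headers; from a truthy state `some f`, the pending block is first closed with the upcoming
-- non-header lines and committed under `f`.
theorem pvMain (ls : List String) :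
    (∀ (d : PySem.Dict String String) (cf : Option String) (cc : List String),
       pvTruthy cf = false →
       (let st := ls.foldl pvStepA (d, cf, cc); pvCommit st.1 st.2.1 st.2.2)
         = pvBlocksLoop (ls.dropWhile (fun l => !pvIsHeader l)) d)
    ∧ (∀ (d : PySem.Dict String String) (f : String) (cc : List String),
       f ≠ "" →
       (let st := ls.foldl pvStepA (d, some f, cc); pvCommit st.1 st.2.1 st.2.2)
         = pvBlocksLoop (ls.dropWhile (fun l => !pvIsHeader l))
             (d.insert f (PySem.Str.join "\n" (cc ++ ls.takeWhile (fun l => !pvIsHeader l))))) := by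
  induction ls with
  | nil =>
    constructor
    · intro d cf cc hcf
      simp [pvBlocksLoop, pvCommit, hcf]
    · intro d f cc hf
      simp [pvBlocksLoop, pvCommit, pvTruthy, hf]
  | cons h t ih =>
    have hdrName : ∀ (d : PySem.Dict String String),
        pvFileName d h = (if 1 < ((PySem.Str.split? h " b/").getD []).length
            then ((PySem.Str.split? h " b/").getD []).getD 1 ""
            else "File " ++ PySem.Int.toStr ((d.size : Int) + 1)) := by
      intro d; rfl
    by_cases hh : pvIsHeader h = true
    · -- header line: A commits (if truthy), opens block [h]; B starts a new block at h
      have hstep : ∀ d cf cc, pvStepA (d, cf, cc) h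
          = (pvCommit d cf cc, some (pvFileName (pvCommit d cf cc) h), [h]) := by
        intro d cf cc
        simp [pvStepA, pvIsHeader] at hh ⊢
        simp [hh]
      have key : ∀ (d : PySem.Dict String String),
          (let st := t.foldl pvStepA (d, some (pvFileName d h), [h]);
            pvCommit st.1 st.2.1 st.2.2)
          = pvBlocksLoop (h :: t) d := by
        intro d
        rw [show pvBlocksLoop (h :: t) d = pvBlocksLoop (t.dropWhile (fun l => !pvIsHeader l))
            (if pvFileName d h == "" then d
             else d.insert (pvFileName d h)
               (PySem.Str.join "\n" (h :: t.takeWhile (fun l => !pvIsHeader l)))) from by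
          rw [pvBlocksLoop]; rw [hdrName d]]
        by_cases hn : pvFileName d h = ""
        · simpa [hn, pvTruthy] using ih.1 d (some (pvFileName d h)) [h] (by simp [hn, pvTruthy])
        · have := ih.2 d (pvFileName d h) [h] hn
          simp only [List.singleton_append] at this ⊢
          simpa [hn] using this
      constructor
      · intro d cf cc hcf
        have hcd : pvCommit d cf cc = d := by simp [pvCommit, hcf]
        simp only [List.foldl_cons, hstep, hcd]
        rw [List.dropWhile_cons_of_neg (by simp [hh])]
        exact key d
      · intro d f cc hf
        have hcd : pvCommit d (some f) cc = d.insert f (PySem.Str.join "\n" cc) := by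
          simp [pvCommit, pvTruthy, hf]
        simp only [List.foldl_cons, hstep, hcd]
        rw [List.dropWhile_cons_of_neg (by simp [hh]),
            List.takeWhile_cons_of_neg (by simp [hh]), List.append_nil]
        exact key (d.insert f (PySem.Str.join "\n" cc))
    · -- non-header line: falsy state ignores it, truthy state appends it to the pending block
      have hh' : pvIsHeader h = false := by revert hh; cases pvIsHeader h <;> simp
      constructor
      · intro d cf cc hcf
        have hstep : pvStepA (d, cf, cc) h = (d, cf, cc) := by
          simp [pvStepA, pvIsHeader] at hh' ⊢
          simp [hh', hcf]
        simp only [List.foldl_cons, hstep]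
        rw [List.dropWhile_cons_of_pos (by simp [hh'])]
        exact ih.1 d cf cc hcf
      · intro d f cc hf
        have hstep : pvStepA (d, some f, cc) h = (d, some f, cc ++ [h]) := by
          simp [pvStepA, pvIsHeader] at hh' ⊢
          simp [hh', pvTruthy, hf]
        simp only [List.foldl_cons, hstep]
        rw [List.dropWhile_cons_of_pos (by simp [hh']),
            List.takeWhile_cons_of_pos (by simp [hh'])]
        have := ih.2 d f (cc ++ [h]) hf
        simpa [List.append_assoc] using this
  
-- ===== VERDICT (by name: the statement is the Claim_ definition above) =====
theorem split_diff_hunks_py_spec : Claim_equal_split_diff_hunks_py := by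
  intro diff_content _
  unfold Spec_split_diff_hunks_py split_diff_hunks_py split_diff_hunks_py_alt
  have := (pvMain ((PySem.Str.split? diff_content "\n").getD [])).1
      PySem.Dict.empty none [] rfl
  simp only at this ⊢
  rw [this]
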